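-- pv_equiv track=rewrite | github.com/gaia-hazlab/gaia-translate-QA | pipeline/generate_eval_dataset.py | next_qa_id
-- ===== SOURCE A (Python) =====
-- from typing import Dict, List, Optional
--
-- def next_qa_id(existing: List[str]) -> str:
--     """Pick the next QA-EVAL-### that doesn't collide."""
--     used = set()
--     for x in existing:
--         if x.startswith("QA-EVAL-"):
--             try:
--                 used.add(int(x.split("-")[-1]))
--             except ValueError:
--                 pass
--     n = 1
--     while n in used:
--         n += 1
--     return f"QA-EVAL-{n:03d}"
-- ===== SOURCE B (Python) =====
-- from typing import List
--
--
-- def _parse_qa_num(x: str):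
--     """Return the numeric suffix of a QA-EVAL id, or None."""
--     if not x.startswith("QA-EVAL-"):
--         return None
--     try:
--         return int(x.split("-")[-1])
--     except ValueError:
--         return None
--
--
-- def next_qa_id(existing: List[str]) -> str:
--     """Pick the next QA-EVAL-### that doesn't collide."""
--     vals = [v for v in map(_parse_qa_num, existing) if v is not None]
--     vals.sort()
--     expected = 1
--     for v in vals:
--         if v < expected:
--             continue
--         if v == expected:
--             expected += 1
--         else:
--             break
--     return f"QA-EVAL-{expected:03d}"
-- ===== Notes on version B (the rewrite author's own statement) =====
-- stated objective: alternative
-- what changed: Replaces the set-probe while loop (membership test for n=1,2,... in a hash set) with collecting the parsed numbers into a list, sorting it, and a single gap-scan with an expected counter that returns the first missing positive integer.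
import Mathlib
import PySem

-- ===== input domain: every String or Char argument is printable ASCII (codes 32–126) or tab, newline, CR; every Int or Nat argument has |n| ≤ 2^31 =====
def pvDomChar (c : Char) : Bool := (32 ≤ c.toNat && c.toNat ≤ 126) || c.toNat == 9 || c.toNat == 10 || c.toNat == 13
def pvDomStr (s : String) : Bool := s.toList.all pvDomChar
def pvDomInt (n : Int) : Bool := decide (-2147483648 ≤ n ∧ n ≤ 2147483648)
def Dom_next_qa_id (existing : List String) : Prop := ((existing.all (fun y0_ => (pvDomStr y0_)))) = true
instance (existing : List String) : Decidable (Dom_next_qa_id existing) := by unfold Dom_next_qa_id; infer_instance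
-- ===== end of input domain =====

-- B replaces A's set-membership probe n = 1, 2, ... by sort-then-gap-scan over the parsed
-- numbers (objective: alternative; same observable behaviour, proved equal below).

-- ===== PORT A =====
-- shared parsing helper: "x.startswith('QA-EVAL-') and int(x.split('-')[-1])", ValueError
-- -> none; this code is identical in Source A and in Source B's _parse_qa_num.
def pvParseQA (x : String) : Option Int :=
  if PySem.Str.startswith x "QA-EVAL-" then
    match PySem.Str.split? x "-" with        -- sep = "-" ≠ "", so always `some parts`
    | some parts =>
      match PySem.List.pyGet? parts (-1) with -- parts[-1]; parts is never empty
      | some s => PySem.Int.ofStr? s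
      | none => none
    | none => none
  else none

-- shared formatting helper: f"QA-EVAL-{n:03d}" = "QA-EVAL-" + str(n).zfill(3)
def pvFmtQA (n : Int) : String :=
  "QA-EVAL-" ++ PySem.Str.zfill (PySem.Int.toStr n) 3

-- termination lemma for A's while loop (cited by pvProbe's decreasing_by)
theorem pvCountP_lt (l : List Int) (n : Int) (h : n ∈ l) :
    l.countP (fun x => decide (n + 1 ≤ x)) < l.countP (fun x => decide (n ≤ x)) := by
  induction l with
  | nil => cases h
  | cons a t ih =>
    simp only [List.countP_cons]
    rcases List.mem_cons.mp h with rfl | hm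
    · have hle : t.countP (fun x => decide (n + 1 ≤ x)) ≤ t.countP (fun x => decide (n ≤ x)) :=
        List.countP_mono_left (fun x _ hx => by simp at hx ⊢; omega)
      have e1 : decide (n + 1 ≤ n) = false := by simp
      have e2 : decide (n ≤ n) = true := by simp
      rw [e1, e2]
      simp only [Bool.false_eq_true, if_false, if_true]
      omega
    · have H := ih hm
      by_cases h1 : (n + 1 : Int) ≤ a <;> by_cases h2 : n ≤ a <;>
        simp [h1, h2] at H ⊢ <;> omega

-- A's "n = 1; while n in used: n += 1"
def pvProbe (used : PySem.Set Int) (n : Int) : Int :=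
  if n ∈ used then pvProbe used (n + 1) else n
termination_by used.countP (fun x => decide (n ≤ x))
decreasing_by exact pvCountP_lt used n (by assumption)

def next_qa_id (existing : List String) : String :=
  let used : PySem.Set Int := existing.foldl (fun acc x =>
    match pvParseQA x with
    | some v => PySem.Set.add acc v
    | none => acc) PySem.Set.empty
  pvFmtQA (pvProbe used 1)

-- ===== PORT B =====
-- B's gap scan over the ascending list, with the expected counter
def pvScan (vals : List Int) (expected : Int) : Int :=
  match vals with
  | [] => expected
  | v :: rest =>
    if v < expected then pvScan rest expected
    else if v == expected then pvScan rest (expected + 1)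
    else expected

def next_qa_id_alt (existing : List String) : String :=
  let vals := (existing.map pvParseQA).filterMap id
  pvFmtQA (pvScan (PySem.List.sorted vals (fun v => v) false) 1)

-- ===== PRECONDITION & SPEC =====
def Spec_next_qa_id (existing : List String) (out : String) : Prop := out = next_qa_id_alt existing
instance (existing : List String) (out : String) : Decidable (Spec_next_qa_id existing out) := by unfold Spec_next_qa_id; infer_instance

-- ===== CLAIM (what is proved, stated in full; the proofs are below) =====
def Claim_equal_next_qa_id : Prop := ∀ (existing : List String), Dom_next_qa_id existing → Spec_next_qa_id existing (next_qa_id existing)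

-- ===== LEMMAS AND PROOFS =====

-- "m is the least value ≥ s outside vals" — the characterisation both searches satisfy
def pvFirst (vals : List Int) (s m : Int) : Prop :=
  s ≤ m ∧ m ∉ vals ∧ ∀ k, s ≤ k → k < m → k ∈ vals

theorem pvFirst_unique {vals : List Int} {s m1 m2 : Int}
    (h1 : pvFirst vals s m1) (h2 : pvFirst vals s m2) : m1 = m2 := by
  by_contra hne
  rcases lt_or_gt_of_ne hne with h | h
  · exact h1.2.1 (h2.2.2 m1 h1.1 h)
  · exact h2.2.1 (h1.2.2 m2 h2.1 h)

theorem pvFirst_congr {l1 l2 : List Int} {s m : Int}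
    (hmem : ∀ x, x ∈ l1 ↔ x ∈ l2) (h : pvFirst l1 s m) : pvFirst l2 s m :=
  ⟨h.1, fun hm => h.2.1 ((hmem m).mpr hm), fun k hk1 hk2 => (hmem k).mp (h.2.2 k hk1 hk2)⟩

theorem pvProbe_first (used : List Int) (n : Int) : pvFirst used n (pvProbe used n) := by
  fun_induction pvProbe used n with
  | case1 n hmem ih =>
    obtain ⟨h1, h2, h3⟩ := ih
    refine ⟨by omega, h2, fun k hk1 hk2 => ?_⟩
    by_cases hk : k = n
    · exact hk ▸ hmem
    · exact h3 k (by omega) hk2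
  | case2 n hmem =>
    exact ⟨le_refl _, hmem, fun k h1 h2 => absurd h2 (by omega)⟩

theorem pvScan_first (vals : List Int) (e : Int)
    (hp : vals.Pairwise (· ≤ ·)) : pvFirst vals e (pvScan vals e) := by
  induction vals generalizing e with
  | nil =>
    show pvFirst [] e e
    exact ⟨le_refl _, by simp, fun k h1 h2 => absurd h2 (by omega)⟩
  | cons v rest ih =>
    obtain ⟨hhead, htail⟩ := List.pairwise_cons.mp hp
    by_cases hlt : v < e
    · have hred : pvScan (v :: rest) e = pvScan rest e := by simp [pvScan, hlt]
      rw [hred]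
      obtain ⟨h1, h2, h3⟩ := ih e htail
      refine ⟨h1, ?_, fun k hk1 hk2 => List.mem_cons_of_mem _ (h3 k hk1 hk2)⟩
      simp only [List.mem_cons, not_or]
      exact ⟨by omega, h2⟩
    · by_cases heq : v = e
      · have hred : pvScan (v :: rest) e = pvScan rest (e + 1) := by
          simp [pvScan, heq]
        rw [hred]
        obtain ⟨h1, h2, h3⟩ := ih (e + 1) htail
        refine ⟨by omega, ?_, fun k hk1 hk2 => ?_⟩
        · simp only [List.mem_cons, not_or]
          exact ⟨by omega, h2⟩
        · by_cases hk : k = v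
          · exact hk ▸ List.mem_cons_self
          · exact List.mem_cons_of_mem _ (h3 k (by omega) hk2)
      · have hred : pvScan (v :: rest) e = e := by simp [pvScan, hlt, heq]
        rw [hred]
        refine ⟨le_refl _, ?_, fun k h1 h2 => absurd h2 (by omega)⟩
        simp only [List.mem_cons, not_or]
        exact ⟨fun h => heq h.symm, fun hmem => absurd (hhead e hmem) (by omega)⟩

theorem pvMem_fold (l : List String) (acc : PySem.Set Int) (x : Int) :
    (x ∈ l.foldl (fun acc x =>
      match pvParseQA x with
      | some v => PySem.Set.add acc v
      | none => acc) acc) ↔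
    x ∈ acc ∨ x ∈ (l.map pvParseQA).filterMap id := by
  induction l generalizing acc with
  | nil => simp
  | cons a t ih =>
    cases hpa : pvParseQA a <;>
      simp only [List.foldl_cons, List.map_cons, List.filterMap_cons, hpa, ih,
        PySem.Set.mem_add, id_eq, List.mem_cons] <;> tauto

-- ===== VERDICT (by name: the statement is the Claim_ definition above) =====
theorem next_qa_id_spec : Claim_equal_next_qa_id := by
  intro existing _
  show next_qa_id existing = next_qa_id_alt existing
  simp only [next_qa_id, next_qa_id_alt]
  refine congrArg pvFmtQA (pvFirst_unique (vals := (existing.map pvParseQA).filterMap id)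
    (s := 1) ?_ ?_)
  · refine pvFirst_congr (fun x => ?_) (pvProbe_first _ 1)
    rw [pvMem_fold]
    simp [PySem.Set.empty]
  · refine pvFirst_congr (fun x => ?_) (pvScan_first _ 1 ?_)
    · simp [PySem.List.mem_sorted]
    · exact PySem.List.sorted_pairwise _ _
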